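-- pv_equiv track=rewrite | github.com/scottincrypto/dune-rari-fuse-assets | rari_fuse_sql/scripts/fusepools.py | generate_sql_query
-- ===== SOURCE A (Python) =====
-- def generate_sql_query(assets):
--     """Takes a list of tuples & formats to SQL text for use in Dune Analytics query"""
--
--     sql_query_string = 'CREATE OR REPLACE VIEW dune_user_generated.rari_capital_fuse_ftokens (pool_index, pool_name, comptroller, ftoken_address, ftoken_name, ftoken_symbol, '
--     sql_query_string += 'ftoken_decimals, underlying_address, underlying_name, underlying_symbol, underlying_decimals) AS VALUES \n'
--
--     index = 0
--     for asset in assets: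
--         if index > 0:
--             sql_query_string += '  , (' + str(asset[0]) + '::numeric, '
--         else:
--             sql_query_string += '    (' + str(asset[0]) + '::numeric, '
--         sql_query_string += "'" + asset[1].replace("'", "''") + "'::text, "
--         sql_query_string += "'" + asset[2].replace("0x", "\\x") + "'::bytea, "
--         sql_query_string += "'" + asset[3].replace("0x", "\\x") + "'::bytea, "
--         sql_query_string += "'" + asset[4].replace("'", "''") + "'::text, "
--         sql_query_string += "'" + asset[5].replace("'", "''") + "'::text, "
--         sql_query_string += str(asset[6]) + "::numeric, "
--         sql_query_string += "'" + asset[7].replace("0x", "\\x") + "'::bytea, "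
--         sql_query_string += "'" + asset[8].replace("'", "''") + "'::text, "
--         sql_query_string += "'" + asset[9].replace("'", "''") + "'::text, "
--         sql_query_string += str(asset[10]) + "::numeric"
--         sql_query_string += ")\n"
--         index +=1
--     sql_query_string += ';'
--
--
--     return sql_query_string
-- ===== SOURCE B (Python) =====
-- _SPEC = [(0, 'numeric'), (1, 'text'), (2, 'bytea'), (3, 'bytea'), (4, 'text'),
--          (5, 'text'), (6, 'numeric'), (7, 'bytea'), (8, 'text'), (9, 'text'),
--          (10, 'numeric')]
--
-- _HEADER = ('CREATE OR REPLACE VIEW dune_user_generated.rari_capital_fuse_ftokens '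
--            '(pool_index, pool_name, comptroller, ftoken_address, ftoken_name, ftoken_symbol, '
--            'ftoken_decimals, underlying_address, underlying_name, underlying_symbol, '
--            'underlying_decimals) AS VALUES \n')
--
--
-- def _field(asset, i, kind):
--     if kind == 'numeric':
--         return str(asset[i]) + '::numeric'
--     if kind == 'text':
--         return "'" + asset[i].replace("'", "''") + "'::text"
--     return "'" + asset[i].replace("0x", "\\x") + "'::bytea"
--
--
-- def generate_sql_query(assets):
--     """Takes a list of tuples & formats to SQL text for use in Dune Analytics query"""
--     rows = []
--     for k, asset in enumerate(assets):
--         prefix = '    (' if k == 0 else '  , ('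
--         rows.append(prefix + ', '.join(_field(asset, i, kind) for i, kind in _SPEC) + ')\n')
--     return _HEADER + ''.join(rows) + ';'
-- ===== Notes on version B (the rewrite author's own statement) =====
-- stated objective: idiomatic
-- what changed: B replaces A's running string with an explicit index counter and eleven sequential concatenation statements per asset by a data-driven (column-index, kind) spec: each row is the ', '-join of the spec-formatted fields, rows are collected in a list and joined once with the header and trailing ';'.
import Mathlib
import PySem

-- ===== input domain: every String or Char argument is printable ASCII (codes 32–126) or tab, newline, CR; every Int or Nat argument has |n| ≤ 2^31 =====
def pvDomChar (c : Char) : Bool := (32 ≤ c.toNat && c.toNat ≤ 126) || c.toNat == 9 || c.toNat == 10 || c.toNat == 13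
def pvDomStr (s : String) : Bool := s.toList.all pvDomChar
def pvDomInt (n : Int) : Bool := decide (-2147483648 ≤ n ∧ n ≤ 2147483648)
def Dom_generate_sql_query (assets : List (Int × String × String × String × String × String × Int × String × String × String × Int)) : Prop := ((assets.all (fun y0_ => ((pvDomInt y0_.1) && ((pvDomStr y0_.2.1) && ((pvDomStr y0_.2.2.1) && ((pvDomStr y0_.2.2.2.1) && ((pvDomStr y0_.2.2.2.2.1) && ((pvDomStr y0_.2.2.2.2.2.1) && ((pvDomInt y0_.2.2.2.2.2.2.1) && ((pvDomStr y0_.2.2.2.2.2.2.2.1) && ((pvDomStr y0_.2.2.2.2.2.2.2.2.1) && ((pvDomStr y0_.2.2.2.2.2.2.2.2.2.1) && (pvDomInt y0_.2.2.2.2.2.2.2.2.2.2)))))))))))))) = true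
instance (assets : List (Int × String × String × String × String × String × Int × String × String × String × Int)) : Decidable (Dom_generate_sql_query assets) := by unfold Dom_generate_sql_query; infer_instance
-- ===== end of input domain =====

-- B restates the row formatting as a data-driven column-spec loop (idiomatic); output proved identical to A's.

abbrev PvT : Type := Int × String × String × String × String × String × Int × String × String × String × Int

-- ===== PORT A =====
-- A: one running string, an explicit index counter, eleven sequential += per asset.
def pvLoopA (st : String × Int) (assets : List PvT) : String × Int :=
  match assets with
  | [] => st
  | asset :: rest =>
    let s := st.1
    let s := if st.2 > 0 then s ++ "  , (" ++ PySem.Int.toStr asset.1 ++ "::numeric, "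
             else s ++ "    (" ++ PySem.Int.toStr asset.1 ++ "::numeric, "
    let s := s ++ "'" ++ PySem.Str.replace asset.2.1 "'" "''" ++ "'::text, "
    let s := s ++ "'" ++ PySem.Str.replace asset.2.2.1 "0x" "\\x" ++ "'::bytea, "
    let s := s ++ "'" ++ PySem.Str.replace asset.2.2.2.1 "0x" "\\x" ++ "'::bytea, "
    let s := s ++ "'" ++ PySem.Str.replace asset.2.2.2.2.1 "'" "''" ++ "'::text, "
    let s := s ++ "'" ++ PySem.Str.replace asset.2.2.2.2.2.1 "'" "''" ++ "'::text, "
    let s := s ++ PySem.Int.toStr asset.2.2.2.2.2.2.1 ++ "::numeric, "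
    let s := s ++ "'" ++ PySem.Str.replace asset.2.2.2.2.2.2.2.1 "0x" "\\x" ++ "'::bytea, "
    let s := s ++ "'" ++ PySem.Str.replace asset.2.2.2.2.2.2.2.2.1 "'" "''" ++ "'::text, "
    let s := s ++ "'" ++ PySem.Str.replace asset.2.2.2.2.2.2.2.2.2.1 "'" "''" ++ "'::text, "
    let s := s ++ PySem.Int.toStr asset.2.2.2.2.2.2.2.2.2.2 ++ "::numeric"
    let s := s ++ ")\n"
    pvLoopA (s, st.2 + 1) rest

def generate_sql_query (assets : List (Int × String × String × String × String × String × Int × String × String × String × Int)) : String :=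
  let s := "CREATE OR REPLACE VIEW dune_user_generated.rari_capital_fuse_ftokens (pool_index, pool_name, comptroller, ftoken_address, ftoken_name, ftoken_symbol, "
  let s := s ++ "ftoken_decimals, underlying_address, underlying_name, underlying_symbol, underlying_decimals) AS VALUES \n"
  (pvLoopA (s, 0) assets).1 ++ ";"

-- ===== PORT B =====
-- B: per-column (index, kind) spec; each row is the ', '-join of the spec-formatted fields.
inductive PvKind : Type
  | num | text | bytea
deriving DecidableEq, Repr

def pvSpec : List (Nat × PvKind) :=
  [(0, .num), (1, .text), (2, .bytea), (3, .bytea), (4, .text), (5, .text),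
   (6, .num), (7, .bytea), (8, .text), (9, .text), (10, .num)]

def pvHeaderB : String := "CREATE OR REPLACE VIEW dune_user_generated.rari_capital_fuse_ftokens (pool_index, pool_name, comptroller, ftoken_address, ftoken_name, ftoken_symbol, ftoken_decimals, underlying_address, underlying_name, underlying_symbol, underlying_decimals) AS VALUES \n"

def pvGetNum (a : PvT) (i : Nat) : Int :=
  if i = 0 then a.1 else if i = 6 then a.2.2.2.2.2.2.1 else a.2.2.2.2.2.2.2.2.2.2

def pvGetStr (a : PvT) (i : Nat) : String :=
  if i = 1 then a.2.1 else if i = 2 then a.2.2.1 else if i = 3 then a.2.2.2.1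
  else if i = 4 then a.2.2.2.2.1 else if i = 5 then a.2.2.2.2.2.1
  else if i = 7 then a.2.2.2.2.2.2.2.1 else if i = 8 then a.2.2.2.2.2.2.2.2.1
  else a.2.2.2.2.2.2.2.2.2.1

def pvField (a : PvT) (i : Nat) : PvKind → String
  | .num => PySem.Int.toStr (pvGetNum a i) ++ "::numeric"
  | .text => "'" ++ PySem.Str.replace (pvGetStr a i) "'" "''" ++ "'::text"
  | .bytea => "'" ++ PySem.Str.replace (pvGetStr a i) "0x" "\\x" ++ "'::bytea"

def pvRow (k : Int) (a : PvT) : String :=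
  (if k = 0 then "    (" else "  , (") ++
    PySem.Str.join ", " (pvSpec.map (fun p => pvField a p.1 p.2)) ++ ")\n"

def generate_sql_query_alt (assets : List (Int × String × String × String × String × String × Int × String × String × String × Int)) : String :=
  pvHeaderB ++ PySem.Str.join "" ((PySem.List.enumerate assets 0).map (fun p => pvRow p.1 p.2)) ++ ";"

-- ===== PRECONDITION & SPEC =====
def Spec_generate_sql_query (assets : List (Int × String × String × String × String × String × Int × String × String × String × Int)) (out : String) : Prop := out = generate_sql_query_alt assets
instance (assets : List (Int × String × String × String × String × String × Int × String × String × String × Int)) (out : String) : Decidable (Spec_generate_sql_query assets out) := by unfold Spec_generate_sql_query; infer_instance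

-- ===== CLAIM (what is proved, stated in full; the proofs are below) =====
def Claim_equal_generate_sql_query : Prop := ∀ (assets : List (Int × String × String × String × String × String × Int × String × String × String × Int)), Dom_generate_sql_query assets → Spec_generate_sql_query assets (generate_sql_query assets)

-- ===== LEMMAS AND PROOFS =====

-- A's eleven concatenated fields of one row (everything between the prefix and ")\n").
def pvFieldsCat (a : PvT) : String :=
  PySem.Int.toStr a.1 ++ "::numeric, " ++
  ("'" ++ PySem.Str.replace a.2.1 "'" "''" ++ "'::text, ") ++
  ("'" ++ PySem.Str.replace a.2.2.1 "0x" "\\x" ++ "'::bytea, ") ++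
  ("'" ++ PySem.Str.replace a.2.2.2.1 "0x" "\\x" ++ "'::bytea, ") ++
  ("'" ++ PySem.Str.replace a.2.2.2.2.1 "'" "''" ++ "'::text, ") ++
  ("'" ++ PySem.Str.replace a.2.2.2.2.2.1 "'" "''" ++ "'::text, ") ++
  (PySem.Int.toStr a.2.2.2.2.2.2.1 ++ "::numeric, ") ++
  ("'" ++ PySem.Str.replace a.2.2.2.2.2.2.2.1 "0x" "\\x" ++ "'::bytea, ") ++
  ("'" ++ PySem.Str.replace a.2.2.2.2.2.2.2.2.1 "'" "''" ++ "'::text, ") ++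
  ("'" ++ PySem.Str.replace a.2.2.2.2.2.2.2.2.2.1 "'" "''" ++ "'::text, ") ++
  (PySem.Int.toStr a.2.2.2.2.2.2.2.2.2.2 ++ "::numeric")

theorem pv_strcat_cons (x : String) (xs : List String) :
    PySem.Str.join "" (x :: xs) = x ++ PySem.Str.join "" xs := by
  apply String.toList_injective
  cases xs with
  | nil => simp [PySem.Chars.join_singleton, PySem.Chars.join_nil]
  | cons y ys => simp [PySem.Chars.join_cons_cons]

theorem pv_fields_eq (a : PvT) :
    PySem.Str.join ", " (pvSpec.map (fun p => pvField a p.1 p.2)) = pvFieldsCat a := by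
  apply String.toList_injective
  simp [pvSpec, pvField, pvGetNum, pvGetStr, pvFieldsCat,
    PySem.Chars.join_cons_cons, PySem.Chars.join_singleton]

-- The string A's loop body has appended to s after one iteration, in A's own association.
def pvBodyA (s : String) (i : Int) (a : PvT) : String :=
  (if i > 0 then s ++ "  , (" ++ PySem.Int.toStr a.1 ++ "::numeric, "
   else s ++ "    (" ++ PySem.Int.toStr a.1 ++ "::numeric, ") ++
  "'" ++ PySem.Str.replace a.2.1 "'" "''" ++ "'::text, " ++
  "'" ++ PySem.Str.replace a.2.2.1 "0x" "\\x" ++ "'::bytea, " ++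
  "'" ++ PySem.Str.replace a.2.2.2.1 "0x" "\\x" ++ "'::bytea, " ++
  "'" ++ PySem.Str.replace a.2.2.2.2.1 "'" "''" ++ "'::text, " ++
  "'" ++ PySem.Str.replace a.2.2.2.2.2.1 "'" "''" ++ "'::text, " ++
  PySem.Int.toStr a.2.2.2.2.2.2.1 ++ "::numeric, " ++
  "'" ++ PySem.Str.replace a.2.2.2.2.2.2.2.1 "0x" "\\x" ++ "'::bytea, " ++
  "'" ++ PySem.Str.replace a.2.2.2.2.2.2.2.2.1 "'" "''" ++ "'::text, " ++
  "'" ++ PySem.Str.replace a.2.2.2.2.2.2.2.2.2.1 "'" "''" ++ "'::text, " ++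
  PySem.Int.toStr a.2.2.2.2.2.2.2.2.2.2 ++ "::numeric" ++ ")\n"

set_option maxHeartbeats 2000000 in
set_option maxRecDepth 8000 in
theorem pv_loopA_cons (s : String) (i : Int) (a : PvT) (rest : List PvT) :
    pvLoopA (s, i) (a :: rest) =
      pvLoopA (s ++ ((if i > 0 then "  , (" else "    (") ++ pvFieldsCat a ++ ")\n"), i + 1) rest := by
  have hx : pvBodyA s i a = s ++ ((if i > 0 then "  , (" else "    (") ++ pvFieldsCat a ++ ")\n") := by
    apply String.toList_injective
    by_cases h : i > 0 <;> simp [pvBodyA, h, pvFieldsCat]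
  calc pvLoopA (s, i) (a :: rest) = pvLoopA (pvBodyA s i a, i + 1) rest := by
        rw [pvLoopA]
        congr 1
    _ = pvLoopA (s ++ ((if i > 0 then "  , (" else "    (") ++ pvFieldsCat a ++ ")\n"), i + 1) rest := by
        rw [hx]

set_option maxHeartbeats 2000000 in
set_option maxRecDepth 8000 in
theorem pv_loopA_tail (rest : List PvT) : ∀ (s : String) (i : Int), 0 < i →
    (pvLoopA (s, i) rest).1 =
      s ++ PySem.Str.join "" (rest.map (fun a => "  , (" ++ pvFieldsCat a ++ ")\n")) := by
  induction rest with
  | nil =>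
    intro s i _
    apply String.toList_injective
    simp [pvLoopA, PySem.Chars.join_nil]
  | cons a rest ih =>
    intro s i hi
    rw [pv_loopA_cons, if_pos hi, ih _ (i + 1) (by omega), List.map_cons, pv_strcat_cons]
    apply String.toList_injective
    simp

set_option maxHeartbeats 2000000 in
set_option maxRecDepth 8000 in
theorem pv_enum_tail (rest : List PvT) : ∀ (k : Int), 0 < k →
    PySem.Str.join "" ((PySem.List.enumerate rest k).map (fun p => pvRow p.1 p.2)) =
      PySem.Str.join "" (rest.map (fun a => "  , (" ++ pvFieldsCat a ++ ")\n")) := by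
  induction rest with
  | nil => intro k _; simp [PySem.List.enumerate]
  | cons a rest ih =>
    intro k hk
    rw [PySem.List.enumerate_cons, List.map_cons, List.map_cons,
      pv_strcat_cons, pv_strcat_cons, ih (k + 1) (by omega)]
    have hk0 : ¬ k = 0 := by omega
    rw [pvRow, if_neg hk0, pv_fields_eq]

-- ===== VERDICT (by name: the statement is the Claim_ definition above) =====
set_option maxHeartbeats 2000000 in
set_option maxRecDepth 8000 in
theorem generate_sql_query_spec : Claim_equal_generate_sql_query := by
  intro assets _
  show _ = _
  cases assets with
  | nil =>
    apply String.toList_injective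
    simp [generate_sql_query, generate_sql_query_alt, pvLoopA, pvHeaderB,
      PySem.List.enumerate, PySem.Chars.join_nil]
  | cons a rest =>
    rw [generate_sql_query, generate_sql_query_alt]
    rw [pv_loopA_cons, if_neg (by omega : ¬ (0:Int) > 0),
      pv_loopA_tail rest _ (0 + 1) (by omega)]
    rw [PySem.List.enumerate_cons, List.map_cons, pv_strcat_cons,
      pv_enum_tail rest (0 + 1) (by omega)]
    rw [pvRow, if_pos rfl, pv_fields_eq]
    apply String.toList_injective
    simp [pvHeaderB]
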